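-- pv_equiv track=rewrite | github.com/iKostanOrg/codewars | kyu_4/sudoku_solution_validator/valid_solution.py | check_sub_grids
-- ===== SOURCE A (Python) =====
-- def check_sub_grids(board: list) -> bool:
--     """
--     Test each of the nine 3x3 sub-grids.
--
--     (also known as blocks)
--     :param board: list
--     :return: bool
--     """
--     sub_grids: list = [
--         board[0][:3] + board[1][:3] + board[2][:3],
--         board[0][3:6] + board[1][3:6] + board[2][3:6],
--         board[0][6:] + board[1][6:] + board[2][6:],
--
--         board[3][:3] + board[4][:3] + board[5][:3],
--         board[3][3:6] + board[4][3:6] + board[5][3:6],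
--         board[3][6:] + board[4][6:] + board[5][6:],
--
--         board[6][:3] + board[7][:3] + board[8][:3],
--         board[6][3:6] + board[7][3:6] + board[8][3:6],
--         board[6][6:] + board[7][6:] + board[8][6:],
--     ]
--
--     for row in sub_grids:
--         if sorted(row) != [1, 2, 3, 4, 5, 6, 7, 8, 9]:
--             return False
--
--     return True
-- ===== SOURCE B (Python) =====
-- def check_sub_grids(board: list) -> bool:
--     """Each 3x3 block must hold the digits 1-9 exactly once.
--
--     Scans each block cell by cell keeping a bitmask of digits seen and a cell
--     count, rejecting an out-of-range value or duplicate as soon as it appears,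
--     and requiring exactly nine cells per block.
--     """
--     triples = [(board[i], board[i + 1], board[i + 2]) for i in range(0, 9, 3)]
--     for triple in triples:
--         for lo, hi in ((0, 3), (3, 6), (6, None)):
--             seen = 0
--             count = 0
--             for row in triple:
--                 for v in row[lo:hi]:
--                     if not 1 <= v <= 9 or seen >> (v - 1) & 1:
--                         return False
--                     seen |= 1 << (v - 1)
--                     count += 1
--             if count != 9:
--                 return False
--     return True
-- ===== Notes on version B (the rewrite author's own statement) =====
-- stated objective: alternative
-- what changed: B replaces A's nine hardcoded slice-built block lists each sorted and compared against [1..9] by a single scan per block keeping a bitmask of digits seen and a cell count, rejecting an out-of-range or duplicate cell immediately; Pre_ only excludes boards with fewer than 9 rows, where A raises IndexError.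
import Mathlib
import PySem

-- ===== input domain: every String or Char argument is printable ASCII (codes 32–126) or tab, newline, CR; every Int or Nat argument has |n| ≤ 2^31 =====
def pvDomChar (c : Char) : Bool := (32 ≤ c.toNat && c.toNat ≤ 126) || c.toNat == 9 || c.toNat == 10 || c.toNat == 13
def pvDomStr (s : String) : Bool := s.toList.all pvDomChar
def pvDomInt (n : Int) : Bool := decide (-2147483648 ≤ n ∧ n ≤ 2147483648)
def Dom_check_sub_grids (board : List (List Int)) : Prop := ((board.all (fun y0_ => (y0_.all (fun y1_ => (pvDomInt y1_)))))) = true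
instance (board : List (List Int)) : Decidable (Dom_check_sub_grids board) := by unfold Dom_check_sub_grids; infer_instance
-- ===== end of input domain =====

-- B validates each 3x3 block in a single scan with a bitmask of seen digits and a cell count
-- (reject out-of-range or duplicate immediately) instead of A's nine slice-built block lists
-- each sorted against [1..9] (objective: alternative).


-- ===== PORT A =====
def check_sub_grids (board : List (List Int)) : Bool :=
  match PySem.List.pyGet? board 0, PySem.List.pyGet? board 1, PySem.List.pyGet? board 2,
        PySem.List.pyGet? board 3, PySem.List.pyGet? board 4, PySem.List.pyGet? board 5,
        PySem.List.pyGet? board 6, PySem.List.pyGet? board 7, PySem.List.pyGet? board 8 with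
  | some b0, some b1, some b2, some b3, some b4, some b5, some b6, some b7, some b8 =>
    let sub_grids : List (List Int) :=
      [ PySem.List.slice b0 none (some 3) ++ PySem.List.slice b1 none (some 3) ++ PySem.List.slice b2 none (some 3),
        PySem.List.slice b0 (some 3) (some 6) ++ PySem.List.slice b1 (some 3) (some 6) ++ PySem.List.slice b2 (some 3) (some 6),
        PySem.List.slice b0 (some 6) none ++ PySem.List.slice b1 (some 6) none ++ PySem.List.slice b2 (some 6) none,
        PySem.List.slice b3 none (some 3) ++ PySem.List.slice b4 none (some 3) ++ PySem.List.slice b5 none (some 3),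
        PySem.List.slice b3 (some 3) (some 6) ++ PySem.List.slice b4 (some 3) (some 6) ++ PySem.List.slice b5 (some 3) (some 6),
        PySem.List.slice b3 (some 6) none ++ PySem.List.slice b4 (some 6) none ++ PySem.List.slice b5 (some 6) none,
        PySem.List.slice b6 none (some 3) ++ PySem.List.slice b7 none (some 3) ++ PySem.List.slice b8 none (some 3),
        PySem.List.slice b6 (some 3) (some 6) ++ PySem.List.slice b7 (some 3) (some 6) ++ PySem.List.slice b8 (some 3) (some 6),
        PySem.List.slice b6 (some 6) none ++ PySem.List.slice b7 (some 6) none ++ PySem.List.slice b8 (some 6) none ]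
    sub_grids.all (fun row => decide (PySem.List.sorted row (fun x => x) false = [1,2,3,4,5,6,7,8,9]))
  | _, _, _, _, _, _, _, _, _ => false  -- board[i] raised IndexError: outside Pre_

-- ===== PORT B =====
-- one cell: `if not 1 <= v <= 9 or seen >> (v-1) & 1: return False; seen |= 1 << (v-1); count += 1`;
-- none = the Python `return False` was taken
def pvStep2 (st : Option (Nat × Nat)) (v : Int) : Option (Nat × Nat) :=
  match st with
  | none => none
  | some (seen, count) =>
    if (!(decide (1 ≤ v) && decide (v ≤ 9))) || seen.testBit (v - 1).toNat then none
    else some (seen ||| (1 <<< (v - 1).toNat), count + 1)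

-- the `for row in triple: for v in row[lo:hi]:` loops of one block plus the `count != 9` check
def pvBlock2 (triple : List (List Int)) (lo : Int) (hi : Option Int) : Bool :=
  match triple.foldl (fun st row => (PySem.List.slice row (some lo) hi).foldl pvStep2 st) (some (0, 0)) with
  | none => false
  | some (_, count) => decide (count = 9)

def check_sub_grids_alt (board : List (List Int)) : Bool :=
  -- `triples = [(board[i], board[i+1], board[i+2]) for i in range(0, 9, 3)]`;
  -- a none is an IndexError raised while building the list, outside Pre_
  (((PySem.List.pyRange 0 9 3).foldr (fun i acc =>
      (PySem.List.pyGet? board i).bind (fun x =>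
        (PySem.List.pyGet? board (i + 1)).bind (fun y =>
          (PySem.List.pyGet? board (i + 2)).bind (fun z =>
            acc.map (fun ts => (x, y, z) :: ts))))) (some [])).map
    (fun triples => triples.all (fun t =>
      [((0 : Int), some (3 : Int)), (3, some 6), (6, none)].all (fun p =>
        pvBlock2 [t.1, t.2.1, t.2.2] p.1 p.2)))).getD false

-- ===== PRECONDITION & SPEC =====
-- Pre_ excludes exactly the boards with fewer than 9 rows, on which A raises IndexError.
def Pre_check_sub_grids (board : List (List Int)) : Prop := 9 ≤ board.length
instance (board : List (List Int)) : Decidable (Pre_check_sub_grids board) := by unfold Pre_check_sub_grids; infer_instance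
def pvWitness_check_sub_grids : List (List Int) :=
  [[5,3,4,6,7,8,9,1,2],[6,7,2,1,9,5,3,4,8],[1,9,8,3,4,2,5,6,7],
   [8,5,9,7,6,1,4,2,3],[4,2,6,8,5,3,7,9,1],[7,1,3,9,2,4,8,5,6],
   [9,6,1,5,3,7,2,8,4],[2,8,7,4,1,9,6,3,5],[3,4,5,2,8,6,1,7,9]]
def Spec_check_sub_grids (board : List (List Int)) (out : Bool) : Prop := out = check_sub_grids_alt board
instance (board : List (List Int)) (out : Bool) : Decidable (Spec_check_sub_grids board out) := by unfold Spec_check_sub_grids; infer_instance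

-- ===== CLAIM (what is proved, stated in full; the proofs are below) =====
def Claim_equal_check_sub_grids : Prop := ∀ (board : List (List Int)), Dom_check_sub_grids board → Pre_check_sub_grids board → Spec_check_sub_grids board (check_sub_grids board)

-- ===== LEMMAS AND PROOFS =====

-- mask-only shadow of pvStep2, used to characterise the bitmask loop
def pvStep (st : Option Nat) (v : Int) : Option Nat :=
  match st with
  | none => none
  | some seen =>
    if (!(decide (1 ≤ v) && decide (v ≤ 9))) || seen.testBit (v - 1).toNat then none
    else some (seen ||| (1 <<< (v - 1).toNat))

lemma foldl_pvStep_none (l : List Int) : l.foldl pvStep none = none := by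
  induction l with
  | nil => rfl
  | cons x t ih => simpa [pvStep] using ih

lemma foldl_pvStep2_none (l : List Int) : l.foldl pvStep2 none = none := by
  induction l with
  | nil => rfl
  | cons x t ih => simpa [pvStep2] using ih

lemma testBit_or_shift (s : Nat) (m k : Nat) :
    (s ||| (1 <<< m)).testBit k = false ↔ s.testBit k = false ∧ k ≠ m := by
  rw [Nat.shiftLeft_eq, one_mul, Nat.testBit_or]
  rcases eq_or_ne k m with rfl | hk
  · simp [Nat.testBit_two_pow_self]
  · simp [Nat.testBit_two_pow_of_ne (Ne.symm hk), hk]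

-- the counting loop is the mask loop with the number of processed cells attached
lemma foldl_pvStep2_eq (l : List Int) : ∀ (s k : Nat),
    l.foldl pvStep2 (some (s, k)) = (l.foldl pvStep (some s)).map (fun m => (m, k + l.length)) := by
  induction l with
  | nil => intro s k; simp
  | cons x t ih =>
    intro s k
    rw [List.foldl_cons, List.foldl_cons]
    by_cases hc : ((!(decide (1 ≤ x) && decide (x ≤ 9))) || s.testBit (x - 1).toNat) = true
    · have h2 : pvStep2 (some (s, k)) x = none := by simp only [pvStep2]; rw [if_pos hc]
      have h1 : pvStep (some s) x = none := by simp only [pvStep]; rw [if_pos hc]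
      rw [h2, h1, foldl_pvStep2_none, foldl_pvStep_none]; rfl
    · have h2 : pvStep2 (some (s, k)) x = some (s ||| (1 <<< (x - 1).toNat), k + 1) := by
        simp only [pvStep2]; rw [if_neg hc]
      have h1 : pvStep (some s) x = some (s ||| (1 <<< (x - 1).toNat)) := by
        simp only [pvStep]; rw [if_neg hc]
      rw [h2, h1, ih]
      cases t.foldl pvStep (some (s ||| (1 <<< (x - 1).toNat))) with
      | none => rfl
      | some m => simp only [Option.map_some, List.length_cons]; congr 2; omega

-- invariant of the mask loop: it survives a list iff every value is a digit 1..9, the values are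
-- pairwise distinct, and none collides with a bit already in the mask
lemma foldl_pvStep_isSome (l : List Int) : ∀ (s : Nat),
    (l.foldl pvStep (some s)).isSome = true ↔
      (∀ v ∈ l, 1 ≤ v ∧ v ≤ 9) ∧ l.Nodup ∧ ∀ v ∈ l, s.testBit (v - 1).toNat = false := by
  induction l with
  | nil => intro s; simp
  | cons x t ih =>
    intro s
    rw [List.foldl_cons]
    by_cases hr : 1 ≤ x ∧ x ≤ 9
    · by_cases hb : s.testBit (x - 1).toNat = true
      · have hstep : pvStep (some s) x = none := by
          simp only [pvStep]; rw [hb]; simp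
        rw [hstep, foldl_pvStep_none]
        constructor
        · intro h; exact absurd h (by simp)
        · rintro ⟨-, -, hs⟩
          exact absurd (hs x List.mem_cons_self) (by rw [hb]; simp)
      · have hb' : s.testBit (x - 1).toNat = false := Bool.eq_false_iff.mpr hb
        have hstep : pvStep (some s) x = some (s ||| (1 <<< (x - 1).toNat)) := by
          simp only [pvStep]; rw [hb']
          simp [decide_eq_true (hr.1), decide_eq_true (hr.2)]
        rw [hstep, ih]
        constructor
        · rintro ⟨h1, h2, h3⟩
          refine ⟨?_, ?_, ?_⟩
          · intro v hv
            rcases List.mem_cons.mp hv with rfl | hv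
            · exact hr
            · exact h1 v hv
          · rw [List.nodup_cons]
            refine ⟨fun hx => ?_, h2⟩
            exact ((testBit_or_shift s _ _).mp (h3 x hx)).2 rfl
          · intro v hv
            rcases List.mem_cons.mp hv with rfl | hv
            · exact hb'
            · exact ((testBit_or_shift s _ _).mp (h3 v hv)).1
        · rintro ⟨h1, h2, h3⟩
          obtain ⟨hxnot, h2'⟩ := List.nodup_cons.mp h2
          refine ⟨fun v hv => h1 v (List.mem_cons_of_mem x hv), h2', ?_⟩
          intro v hv
          rw [testBit_or_shift]
          refine ⟨h3 v (List.mem_cons_of_mem x hv), fun heq => ?_⟩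
          have hv9 := h1 v (List.mem_cons_of_mem x hv)
          have hvx : v = x := by omega
          exact hxnot (hvx ▸ hv)
    · have hstep : pvStep (some s) x = none := by
        simp only [pvStep]
        have : (!(decide (1 ≤ x) && decide (x ≤ 9))) = true := by
          simp only [Bool.not_eq_true', Bool.and_eq_false_iff]
          rcases not_and_or.mp hr with h | h
          · exact Or.inl (decide_eq_false h)
          · exact Or.inr (decide_eq_false h)
        rw [this]; simp
      rw [hstep, foldl_pvStep_none]
      constructor
      · intro h; exact absurd h (by simp)
      · rintro ⟨h1, -, -⟩
        exact absurd (h1 x List.mem_cons_self) hr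

-- a list sorts to [1..9] iff its values are digits 1..9, pairwise distinct, and nine in number
lemma sorted_eq_iff (l : List Int) :
    PySem.List.sorted l (fun x => x) false = [1,2,3,4,5,6,7,8,9] ↔
      (∀ v ∈ l, 1 ≤ v ∧ v ≤ 9) ∧ l.Nodup ∧ l.length = 9 := by
  have hmem : ∀ v : Int, v ∈ ([1,2,3,4,5,6,7,8,9] : List Int) ↔ 1 ≤ v ∧ v ≤ 9 := by
    intro v; simp only [List.mem_cons, List.not_mem_nil, or_false]; omega
  constructor
  · intro hs
    have hperm : l.Perm [1,2,3,4,5,6,7,8,9] :=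
      (hs ▸ PySem.List.sorted_perm l (fun x => x) false).symm.symm |>.symm
    exact ⟨fun v hv => (hmem v).mp (hperm.mem_iff.mp hv),
      hperm.nodup_iff.mpr (by decide), by simpa using hperm.length_eq⟩
  · rintro ⟨h1, h2, h3⟩
    have hsub : l ⊆ [1,2,3,4,5,6,7,8,9] := fun v hv => (hmem v).mpr (h1 v hv)
    have hsp : List.Subperm l [1,2,3,4,5,6,7,8,9] := List.Nodup.subperm h2 hsub
    have hperm : l.Perm [1,2,3,4,5,6,7,8,9] := hsp.perm_of_length_le (by simp [h3])
    exact PySem.List.sorted_id_eq_of_perm_of_pairwise _ _ hperm.symm (by decide)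

-- one block of B (the two inner loops plus the count check) computes A's sorted comparison
lemma pvBlock2_sorted (x y z : List Int) (lo : Int) (hi : Option Int) :
    pvBlock2 [x, y, z] lo hi =
      decide (PySem.List.sorted
          (PySem.List.slice x (some lo) hi ++ PySem.List.slice y (some lo) hi ++
            PySem.List.slice z (some lo) hi) (fun v => v) false = [1,2,3,4,5,6,7,8,9]) := by
  have hfold : [x, y, z].foldl (fun st row => (PySem.List.slice row (some lo) hi).foldl pvStep2 st) (some (0, 0))
      = (PySem.List.slice x (some lo) hi ++ PySem.List.slice y (some lo) hi ++
          PySem.List.slice z (some lo) hi).foldl pvStep2 (some (0, 0)) := by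
    simp [List.foldl_append]
  rw [pvBlock2, hfold, foldl_pvStep2_eq]
  cases h : (PySem.List.slice x (some lo) hi ++ PySem.List.slice y (some lo) hi ++
      PySem.List.slice z (some lo) hi).foldl pvStep (some 0) with
  | none =>
    simp only [Option.map_none]
    rw [eq_comm, decide_eq_false_iff_not, sorted_eq_iff]
    rintro ⟨h1, h2, -⟩
    have := (foldl_pvStep_isSome _ 0).mpr ⟨h1, h2, fun v _ => Nat.zero_testBit _⟩
    rw [h] at this; exact absurd this (by simp)
  | some m =>
    simp only [Option.map_some, Nat.zero_add]
    have hsome := (foldl_pvStep_isSome _ 0).mp (by rw [h]; rfl)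
    rw [Bool.eq_iff_iff, decide_eq_true_iff, decide_eq_true_iff, sorted_eq_iff]
    exact ⟨fun hc => ⟨hsome.1, hsome.2.1, hc⟩, fun hc => hc.2.2⟩

lemma g9_0 {α : Type} (r0 r1 r2 r3 r4 r5 r6 r7 r8 : α) (rest : List α) :
    PySem.List.pyGet? (r0::r1::r2::r3::r4::r5::r6::r7::r8::rest) 0 = some r0 := by
  norm_num [pysem]; try rfl
lemma g9_1 {α : Type} (r0 r1 r2 r3 r4 r5 r6 r7 r8 : α) (rest : List α) :
    PySem.List.pyGet? (r0::r1::r2::r3::r4::r5::r6::r7::r8::rest) 1 = some r1 := by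
  norm_num [pysem]; try rfl
lemma g9_2 {α : Type} (r0 r1 r2 r3 r4 r5 r6 r7 r8 : α) (rest : List α) :
    PySem.List.pyGet? (r0::r1::r2::r3::r4::r5::r6::r7::r8::rest) 2 = some r2 := by
  norm_num [pysem]; try rfl
lemma g9_3 {α : Type} (r0 r1 r2 r3 r4 r5 r6 r7 r8 : α) (rest : List α) :
    PySem.List.pyGet? (r0::r1::r2::r3::r4::r5::r6::r7::r8::rest) 3 = some r3 := by
  norm_num [pysem]; try rfl
lemma g9_4 {α : Type} (r0 r1 r2 r3 r4 r5 r6 r7 r8 : α) (rest : List α) :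
    PySem.List.pyGet? (r0::r1::r2::r3::r4::r5::r6::r7::r8::rest) 4 = some r4 := by
  norm_num [pysem]; try rfl
lemma g9_5 {α : Type} (r0 r1 r2 r3 r4 r5 r6 r7 r8 : α) (rest : List α) :
    PySem.List.pyGet? (r0::r1::r2::r3::r4::r5::r6::r7::r8::rest) 5 = some r5 := by
  norm_num [pysem]; try rfl
lemma g9_6 {α : Type} (r0 r1 r2 r3 r4 r5 r6 r7 r8 : α) (rest : List α) :
    PySem.List.pyGet? (r0::r1::r2::r3::r4::r5::r6::r7::r8::rest) 6 = some r6 := by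
  norm_num [pysem]; try rfl
lemma g9_7 {α : Type} (r0 r1 r2 r3 r4 r5 r6 r7 r8 : α) (rest : List α) :
    PySem.List.pyGet? (r0::r1::r2::r3::r4::r5::r6::r7::r8::rest) 7 = some r7 := by
  norm_num [pysem]; try rfl
lemma g9_8 {α : Type} (r0 r1 r2 r3 r4 r5 r6 r7 r8 : α) (rest : List α) :
    PySem.List.pyGet? (r0::r1::r2::r3::r4::r5::r6::r7::r8::rest) 8 = some r8 := by
  norm_num [pysem]; try rfl

lemma sliceA_take3 (r : List Int) : PySem.List.slice r none (some 3) = r.take 3 := by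
  rw [PySem.List.slice_to r (b := 3) (by norm_num)]; rfl
lemma slice_mid (r : List Int) : PySem.List.slice r (some 3) (some 6) = (r.drop 3).take 3 := by
  rw [PySem.List.slice_toNat r (a := 3) (b := 6) (by norm_num) (by norm_num)]; rfl
lemma slice_drop6 (r : List Int) : PySem.List.slice r (some 6) none = r.drop 6 := by
  rw [PySem.List.slice_from r (a := 6) (by norm_num)]; rfl

-- ===== VERDICT (by name: the statement is the Claim_ definition above) =====
set_option maxRecDepth 65536 in
set_option maxHeartbeats 1000000 in
theorem check_sub_grids_spec : Claim_equal_check_sub_grids := by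
  intro board _ hlen
  unfold Pre_check_sub_grids at hlen
  unfold Spec_check_sub_grids
  rcases board with _|⟨r0,board⟩; · simp at hlen
  rcases board with _|⟨r1,board⟩; · simp at hlen
  rcases board with _|⟨r2,board⟩; · simp at hlen
  rcases board with _|⟨r3,board⟩; · simp at hlen
  rcases board with _|⟨r4,board⟩; · simp at hlen
  rcases board with _|⟨r5,board⟩; · simp at hlen
  rcases board with _|⟨r6,board⟩; · simp at hlen
  rcases board with _|⟨r7,board⟩; · simp at hlen
  rcases board with _|⟨r8,board⟩; · simp at hlen
  show check_sub_grids _ = check_sub_grids_alt _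
  rw [check_sub_grids, check_sub_grids_alt]
  simp only [g9_0, g9_1, g9_2, g9_3, g9_4, g9_5, g9_6, g9_7, g9_8]
  have hr9 : PySem.List.pyRange 0 9 3 = [0, 3, 6] := by decide
  rw [hr9]
  simp only [List.all_cons, List.all_nil, Bool.and_true]
  norm_num [pvBlock2_sorted, g9_0, g9_1, g9_2, g9_3, g9_4, g9_5, g9_6, g9_7, g9_8]
  simp only [sliceA_take3, slice_mid, slice_drop6]
  simp only [Bool.and_assoc]
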